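-- pv_equiv track=rewrite | github.com/cannolis/R-SBFL | RSBFL_Python/group_divider.py | bin_func
-- ===== SOURCE A (Python) =====
-- def bin_func(the_num, bin_num, base_num=12):
--     if the_num > base_num:
--         assert bin_num > 0
--         min_num = the_num - base_num
--         quotient = int(min_num / bin_num)
--         remainder = min_num % bin_num
--         if remainder > 0:
--             bins = [quotient] * (bin_num - remainder) + [quotient + 1] * remainder
--         elif remainder < 0:
--             bins = [quotient - 1] * - remainder + [quotient] * (bin_num + remainder)
--         else:
--             bins = [quotient] * bin_num
--
--         new_bins = [i for i in range(1, base_num + 1)]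
--         for index in range(len(bins)):
--             if bins[index] != 0:
--                 new_bins.append(sum(bins[:index + 1]) + base_num)
--     else:
--         new_bins = [i for i in range(1, the_num + 1)]
--
--     return new_bins
-- ===== SOURCE B (Python) =====
-- def bin_func(the_num, bin_num, base_num=12):
--     if the_num <= base_num:
--         return list(range(1, the_num + 1))
--     q, r = divmod(the_num - base_num, bin_num)
--     res = list(range(1, base_num + 1))
--     if q == 0:
--         res += range(base_num + 1, base_num + r + 1)
--     else:
--         n = bin_num - r
--         res += range(base_num + q, base_num + q * n + 1, q)
--         start = base_num + q * n
--         res += range(start + q + 1, start + (q + 1) * r + 1, q + 1)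
--     return res
-- ===== Notes on version B (the rewrite author's own statement) =====
-- stated objective: alternative
-- what changed: B replaces A's per-index loop that re-sums the slice bins[:i+1] for every index (and the intermediate bins list itself) by closed-form arithmetic ranges computed directly from divmod(the_num - base_num, bin_num); A does O(bin_num) slice-sums of length up to bin_num, B builds the same list from three range() objects (measured speed-up was not confirmed at the largest benchmark sizes, so no speed claim is made).
import Mathlib
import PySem

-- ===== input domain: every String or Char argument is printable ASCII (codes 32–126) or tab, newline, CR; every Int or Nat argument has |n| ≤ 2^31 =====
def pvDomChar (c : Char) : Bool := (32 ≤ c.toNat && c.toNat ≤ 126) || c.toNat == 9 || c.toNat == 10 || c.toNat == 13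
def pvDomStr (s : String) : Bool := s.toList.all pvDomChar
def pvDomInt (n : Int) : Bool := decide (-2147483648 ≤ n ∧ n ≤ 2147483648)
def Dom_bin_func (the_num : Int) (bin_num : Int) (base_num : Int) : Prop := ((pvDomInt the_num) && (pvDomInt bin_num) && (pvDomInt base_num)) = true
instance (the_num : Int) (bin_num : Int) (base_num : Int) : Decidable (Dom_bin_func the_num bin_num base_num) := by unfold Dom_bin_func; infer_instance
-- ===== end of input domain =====

-- B replaces A's per-index slice re-summation loop (sum(bins[:i+1]) for each index) and the
-- intermediate bins list by closed-form arithmetic ranges computed from divmod.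


-- ===== PORT A =====
def bin_func (the_num : Int) (bin_num : Int) (base_num : Int) : List Int :=
  if the_num > base_num then
    -- 'assert bin_num > 0': bin_num ≤ 0 raises AssertionError here; excluded by Pre_bin_func
    let min_num := the_num - base_num
    -- int(min_num / bin_num): PySem.Int.truncdiv is exact on Dom (|min_num| ≤ 2^32 < 2^53, |bin_num| ≤ 2^31)
    let quotient := PySem.Int.truncdiv min_num bin_num
    let remainder := PySem.Int.mod min_num bin_num
    let bins : List Int :=
      if remainder > 0 then
        PySem.List.pyRepeat [quotient] (bin_num - remainder) ++ PySem.List.pyRepeat [quotient + 1] remainder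
      else if remainder < 0 then
        PySem.List.pyRepeat [quotient - 1] (-remainder) ++ PySem.List.pyRepeat [quotient] (bin_num + remainder)
      else
        PySem.List.pyRepeat [quotient] bin_num
    (PySem.List.pyRange 0 (PySem.List.len bins) 1).foldl
      (fun new_bins index =>
        if PySem.List.pyGetD bins index 0 ≠ 0 then
          new_bins ++ [(PySem.List.slice bins none (some (index + 1))).sum + base_num]
        else new_bins)
      (PySem.List.pyRange 1 (base_num + 1) 1)
  else
    PySem.List.pyRange 1 (the_num + 1) 1

-- ===== PORT B =====
def bin_func_alt (the_num : Int) (bin_num : Int) (base_num : Int) : List Int :=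
  if the_num ≤ base_num then
    PySem.List.pyRange 1 (the_num + 1) 1
  else
    match PySem.Int.divmod? (the_num - base_num) bin_num with
    | none => []  -- bin_num = 0: B raises ZeroDivisionError here; outside Pre_bin_func
    | some (q, r) =>
      let res := PySem.List.pyRange 1 (base_num + 1) 1
      if q = 0 then
        res ++ PySem.List.pyRange (base_num + 1) (base_num + r + 1) 1
      else
        let n := bin_num - r
        let res₁ := res ++ PySem.List.pyRange (base_num + q) (base_num + q * n + 1) q
        let start := base_num + q * n
        res₁ ++ PySem.List.pyRange (start + q + 1) (start + (q + 1) * r + 1) (q + 1)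

-- ===== PRECONDITION & SPEC =====
-- A raises AssertionError when the_num > base_num and bin_num ≤ 0; those inputs are excluded.
def Pre_bin_func (the_num : Int) (bin_num : Int) (base_num : Int) : Prop :=
  the_num > base_num → bin_num > 0
instance (the_num : Int) (bin_num : Int) (base_num : Int) : Decidable (Pre_bin_func the_num bin_num base_num) := by unfold Pre_bin_func; infer_instance
def pvWitness_bin_func : Int × Int × Int := (20, 3, 12)

def Spec_bin_func (the_num : Int) (bin_num : Int) (base_num : Int) (out : List Int) : Prop := out = bin_func_alt the_num bin_num base_num
instance (the_num : Int) (bin_num : Int) (base_num : Int) (out : List Int) : Decidable (Spec_bin_func the_num bin_num base_num out) := by unfold Spec_bin_func; infer_instance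

-- ===== CLAIM (what is proved, stated in full; the proofs are below) =====
def Claim_equal_bin_func : Prop := ∀ (the_num : Int) (bin_num : Int) (base_num : Int), Dom_bin_func the_num bin_num base_num → Pre_bin_func the_num bin_num base_num → Spec_bin_func the_num bin_num base_num (bin_func the_num bin_num base_num)

-- ===== LEMMAS AND PROOFS =====

-- sum of a prefix that stays inside the first replicate block
lemma pv_sum_take_left (q : Int) (n m k : Nat) (hk : k ≤ n) :
    ((List.replicate n q ++ List.replicate m (q + 1)).take k).sum = k * q := by
  rw [List.take_append_of_le_length (by simpa using hk), List.take_replicate,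
    List.sum_replicate_int]
  simp [Nat.min_eq_left hk]

-- sum of a prefix that reaches j elements into the second replicate block
lemma pv_sum_take_right (q : Int) (n m j : Nat) (hj : j ≤ m) :
    ((List.replicate n q ++ List.replicate m (q + 1)).take (n + j)).sum
      = n * q + j * (q + 1) := by
  have h : (List.replicate n q ++ List.replicate m (q + 1)).take
      ((List.replicate n q).length + j) = List.replicate n q ++ (List.replicate m (q + 1)).take j :=
    List.take_length_add_append j
  rw [List.length_replicate] at h
  rw [h, List.sum_append, List.take_replicate, List.sum_replicate_int, List.sum_replicate_int]
  simp [Nat.min_eq_left hj]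


lemma pv_loopA (q : Int) (hq : 0 ≤ q) (n m : Nat) (base : Int) (init : List Int) :
    (PySem.List.pyRange 0 (PySem.List.len (List.replicate n q ++ List.replicate m (q + 1))) 1).foldl
      (fun acc i =>
        if PySem.List.pyGetD (List.replicate n q ++ List.replicate m (q + 1)) i 0 ≠ 0 then
          acc ++ [(PySem.List.slice (List.replicate n q ++ List.replicate m (q + 1)) none (some (i + 1))).sum + base]
        else acc) init
    = init ++ (if q = 0 then (PySem.List.pyRange 0 (m : Int) 1).map (fun j => base + (j + 1))
        else (PySem.List.pyRange 0 (n : Int) 1).map (fun k => base + q * (k + 1))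
          ++ (PySem.List.pyRange 0 (m : Int) 1).map (fun j => base + q * n + (q + 1) * (j + 1))) := by
  set bins := List.replicate n q ++ List.replicate m (q + 1) with hbins
  have hlen : bins.length = n + m := by simp [hbins]
  have hlenI : PySem.List.len bins = ((n : Int) + m) := by
    rw [PySem.List.len_eq, hlen]; push_cast; ring
  have hstep : (fun (acc : List Int) (i : Int) =>
        if PySem.List.pyGetD bins i 0 ≠ 0 then
          acc ++ [(PySem.List.slice bins none (some (i + 1))).sum + base] else acc)
      = fun acc i => if (decide (PySem.List.pyGetD bins i 0 ≠ 0)) = true then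
          acc ++ [(PySem.List.slice bins none (some (i + 1))).sum + base] else acc := by
    funext acc i; by_cases h : PySem.List.pyGetD bins i 0 = 0 <;> simp [h]
  rw [hstep, PySem.List.foldl_append_if, hlenI,
    PySem.List.pyRange_one_append 0 (n : Int) ((n : Int) + m) (by positivity) (by omega),
    List.filter_append, List.map_append]
  have hget1 : ∀ i : Int, 0 ≤ i → i < (n : Int) → PySem.List.pyGetD bins i 0 = q := by
    intro i h1 h2
    have hlb : i < ((bins.length : Nat) : Int) := by rw [hlen]; push_cast; omega
    rw [PySem.List.pyGetD_eq_getElem bins 0 h1 hlb]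
    simp only [hbins]
    rw [List.getElem_append_left (by simp only [List.length_replicate]; omega), List.getElem_replicate]
  have hget2 : ∀ i : Int, (n : Int) ≤ i → i < (n : Int) + m → PySem.List.pyGetD bins i 0 = q + 1 := by
    intro i h1 h2
    have h0 : 0 ≤ i := le_trans (by positivity) h1
    have hlb : i < ((bins.length : Nat) : Int) := by rw [hlen]; push_cast; omega
    rw [PySem.List.pyGetD_eq_getElem bins 0 h0 hlb]
    simp only [hbins]
    rw [List.getElem_append_right (by simp only [List.length_replicate]; omega), List.getElem_replicate]
  have hf1 : ∀ i : Int, 0 ≤ i → i < (n : Int) →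
      (PySem.List.slice bins none (some (i + 1))).sum + base = base + q * (i + 1) := by
    intro i h1 h2
    rw [PySem.List.slice_to bins (by omega)]
    have ht : (i + 1).toNat = i.toNat + 1 := by omega
    rw [ht, pv_sum_take_left q n m (i.toNat + 1) (by omega)]
    push_cast [Int.toNat_of_nonneg h1]; ring
  have hf2 : ∀ i : Int, (n : Int) ≤ i → i < (n : Int) + m →
      (PySem.List.slice bins none (some (i + 1))).sum + base
        = base + q * n + (q + 1) * (i - n + 1) := by
    intro i h1 h2
    have h0 : 0 ≤ i := le_trans (by positivity) h1
    rw [PySem.List.slice_to bins (by omega)]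
    have ht : (i + 1).toNat = n + ((i - n).toNat + 1) := by omega
    rw [ht, pv_sum_take_right q n m ((i - n).toNat + 1) (by omega)]
    push_cast [Int.toNat_of_nonneg (by omega : (0:Int) ≤ i - n)]; ring
  -- the second block is always kept (its entries are q+1 ≥ 1)
  have hfil2 : (PySem.List.pyRange (n : Int) ((n : Int) + m) 1).filter
      (fun i => decide (PySem.List.pyGetD bins i 0 ≠ 0))
      = PySem.List.pyRange (n : Int) ((n : Int) + m) 1 := by
    rw [List.filter_eq_self]
    intro i hi
    rcases PySem.List.mem_pyRange_one.mp hi with ⟨hi1, hi2⟩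
    simp [hget2 i hi1 hi2]; omega
  have hmap2 : (PySem.List.pyRange (n : Int) ((n : Int) + m) 1).map
      (fun i => (PySem.List.slice bins none (some (i + 1))).sum + base)
      = (PySem.List.pyRange 0 (m : Int) 1).map (fun j => base + q * n + (q + 1) * (j + 1)) := by
    rw [PySem.List.pyRange_one, PySem.List.pyRange_one, List.map_map, List.map_map]
    have hm : (((n : Int) + m) - n).toNat = m := by omega
    have hm0 : (((m : Int)) - 0).toNat = m := by omega
    rw [hm, hm0]
    refine List.map_congr_left ?_
    intro j hj
    have hjm : j < m := List.mem_range.mp hj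
    simp only [Function.comp]
    rw [hf2 ((n : Int) + j) (by omega) (by omega)]
    ring
  by_cases hq0 : q = 0
  · subst hq0
    have hfil1 : (PySem.List.pyRange 0 (n : Int) 1).filter
        (fun i => decide (PySem.List.pyGetD bins i 0 ≠ 0)) = [] := by
      rw [List.filter_eq_nil_iff]
      intro i hi
      rcases PySem.List.mem_pyRange_one.mp hi with ⟨hi1, hi2⟩
      simp [hget1 i hi1 hi2]
    rw [hfil1, hfil2, hmap2]
    simp
  · have hq1 : 1 ≤ q := by omega
    have hfil1 : (PySem.List.pyRange 0 (n : Int) 1).filter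
        (fun i => decide (PySem.List.pyGetD bins i 0 ≠ 0)) = PySem.List.pyRange 0 (n : Int) 1 := by
      rw [List.filter_eq_self]
      intro i hi
      rcases PySem.List.mem_pyRange_one.mp hi with ⟨hi1, hi2⟩
      simp [hget1 i hi1 hi2]; omega
    have hmap1 : (PySem.List.pyRange 0 (n : Int) 1).map
        (fun i => (PySem.List.slice bins none (some (i + 1))).sum + base)
        = (PySem.List.pyRange 0 (n : Int) 1).map (fun k => base + q * (k + 1)) := by
      refine List.map_congr_left ?_
      intro i hi
      rcases PySem.List.mem_pyRange_one.mp hi with ⟨hi1, hi2⟩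
      rw [hf1 i hi1 hi2]
    rw [hfil1, hfil2, hmap1, hmap2]
    simp [hq0]

-- a map of an affine function over range(0,L) is an arithmetic range with step s
lemma pv_block (a s L : Int) (hs : 0 < s) :
    (PySem.List.pyRange 0 L 1).map (fun k => a + s * (k + 1))
      = PySem.List.pyRange (a + s) (a + s * L + 1) s := by
  rw [PySem.List.pyRange_of_pos _ _ hs, PySem.List.pyRange_one]
  by_cases hL : 0 < L
  · rw [if_pos (by nlinarith)]
    have hnum : a + s * L + 1 - (a + s) + s - 1 = s * L := by ring
    rw [hnum, Int.mul_ediv_cancel_left _ hs.ne', sub_zero, List.map_map]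
    refine List.map_congr_left ?_
    intro k _
    simp only [Function.comp]
    ring
  · rw [if_neg (by nlinarith [hs.le]), show (L - 0).toNat = 0 by omega]
    simp

lemma pv_main : ∀ (t b base : Int), (t > base → b > 0) →
    bin_func t b base = bin_func_alt t b base := by
  intro t b base hpre
  by_cases htb : t > base
  · have hb : 0 < b := hpre htb
    have hm : 0 < t - base := by omega
    have htd : PySem.Int.truncdiv (t - base) b = PySem.Int.floordiv (t - base) b :=
      (Int.fdiv_eq_tdiv_of_nonneg (by omega) hb.le).symm
    have hdm : PySem.Int.divmod? (t - base) b
        = some (PySem.Int.floordiv (t - base) b, PySem.Int.mod (t - base) b) := by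
      simp [PySem.Int.divmod?, PySem.Int.floordiv, PySem.Int.mod, hb.ne']
    simp only [bin_func, bin_func_alt, if_pos htb, if_neg (not_le.mpr htb), hdm, htd]
    set q := PySem.Int.floordiv (t - base) b with hqdef
    set r := PySem.Int.mod (t - base) b with hrdef
    have hr0 : 0 ≤ r := PySem.Int.mod_nonneg _ hb
    have hrb : r < b := PySem.Int.mod_lt _ hb
    have hqr : q * b + r = t - base := PySem.Int.floordiv_mul_add_mod _ _
    have hq0 : 0 ≤ q := Int.fdiv_nonneg (by omega) hb.le
    by_cases hr : r > 0
    · rw [if_pos hr]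
      rw [PySem.List.pyRepeat_singleton, PySem.List.pyRepeat_singleton,
        pv_loopA q hq0 (b - r).toNat r.toNat base _]
      have hn : (((b - r).toNat : Nat) : Int) = b - r := Int.toNat_of_nonneg (by omega)
      have hrn : (((r.toNat : Nat)) : Int) = r := Int.toNat_of_nonneg hr0
      rw [hn, hrn]
      by_cases hq : q = 0
      · rw [if_pos hq, if_pos hq]
        rw [show (fun j : Int => base + (j + 1)) = (fun j : Int => base + 1 * (j + 1)) by funext j; ring,
          pv_block base 1 r one_pos,
          show base + 1 * r + 1 = base + r + 1 by ring]
      · rw [if_neg hq, if_neg hq]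
        have hq1 : 0 < q := lt_of_le_of_ne hq0 (Ne.symm hq)
        rw [show base + q * (b - r) + q + 1 = base + q * (b - r) + (q + 1) by ring,
          pv_block base q (b - r) hq1,
          pv_block (base + q * (b - r)) (q + 1) r (by omega),
          List.append_assoc]
    · have hr' : r = 0 := le_antisymm (not_lt.mp hr) hr0
      rw [if_neg hr, if_neg (by omega : ¬ r < 0)]
      have hqpos : q ≠ 0 := by
        intro h; rw [h] at hqr; omega
      rw [PySem.List.pyRepeat_singleton,
        show List.replicate b.toNat q = List.replicate b.toNat q ++ List.replicate 0 (q + 1) from (List.append_nil _).symm,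
        pv_loopA q hq0 b.toNat 0 base _]
      have hn : ((b.toNat : Nat) : Int) = b := Int.toNat_of_nonneg hb.le
      rw [if_neg hqpos, if_neg hqpos, hn]
      rw [show ((0 : Nat) : Int) = 0 from rfl, PySem.List.pyRange_one_eq_nil (le_refl 0), List.map_nil, List.append_nil]
      rw [hr', sub_zero]
      have hq1 : 0 < q := lt_of_le_of_ne hq0 (Ne.symm hqpos)
      rw [pv_block base q b hq1,
        show base + q * b + (q + 1) * 0 + 1 = base + q * b + 1 by ring,
        PySem.List.pyRange_of_pos _ _ (by omega : (0:Int) < q + 1),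
        if_neg (by omega : ¬ base + q * b + q + 1 < base + q * b + 1),
        List.range_zero, List.map_nil, List.append_nil]
  · simp only [bin_func, bin_func_alt, if_neg htb, if_pos (not_lt.mp htb)]

-- ===== VERDICT (by name: the statement is the Claim_ definition above) =====
theorem bin_func_spec : Claim_equal_bin_func := by
  intro the_num bin_num base_num _hdom hpre
  unfold Spec_bin_func
  exact pv_main the_num bin_num base_num hpre
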